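-- pv_equiv track=rewrite | github.com/NikiDevil20/BayAKM | src/logic/smiles/sum_formula_converter.py | make_formula
-- ===== SOURCE A (Python) =====
-- def make_formula(formula: str):
--     if not isinstance(formula, str):
--         return formula
--
--     sub = str.maketrans("0123456789", "₀₁₂₃₄₅₆₇₈₉")
--     supers_map = {"t": "ᵗ", "i": "ᶦ"}
--     out = ""
--     numeric = 0
--     alphabet = 0
--     exclude = "G"
--     _length = len(formula)
--
--     for index, character in enumerate(formula):
--         if index >=1 and character.isdigit() and formula[index-1] == exclude:
--             out += character
--             numeric += 1
--             continue
--
--         if character in supers_map and (index + 2) < _length: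
--             next_chars = formula[index+1] + formula[index+2]
--             if ((character == "t" and next_chars == "Bu")
--                     or (character == "i" and next_chars == "Pr")):
--                 out += supers_map[character]
--                 alphabet += 1
--                 continue
--
--         out += character.translate(sub)
--         if character.isdigit():
--             numeric += 1
--         else:
--             alphabet += 1
--     if numeric > alphabet:
--         return formula
--
--     return out
-- ===== SOURCE B (Python) =====
-- def make_formula(formula):
--     if not isinstance(formula, str):
--         return formula
--     digits = sum(c.isdigit() for c in formula)
--     if 2 * digits > len(formula):
--         return formula
--     sub = dict(zip("0123456789", "\u2080\u2081\u2082\u2083\u2084\u2085\u2086\u2087\u2088\u2089"))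
--     out = []
--     protect = False
--     i, n = 0, len(formula)
--     while i < n:
--         c = formula[i]
--         if protect and c.isdigit():
--             out.append(c)
--         elif c == "t" and formula[i + 1:i + 3] == "Bu":
--             out.append("\u1d57Bu")
--             i += 2
--             c = "u"
--         elif c == "i" and formula[i + 1:i + 3] == "Pr":
--             out.append("\u1da6Pr")
--             i += 2
--             c = "r"
--         else:
--             out.append(sub.get(c, c))
--         protect = c == "G"
--         i += 1
--     return "".join(out)
-- ===== Notes on version B (the rewrite author's own statement) =====
-- stated objective: alternative
-- what changed: Decides the pass-through case with an upfront digit count instead of running numeric/alphabet counters, then renders in a single while-loop that consumes tBu/iPr as whole three-character tokens and tracks a protect-after-G flag, replacing A's per-index lookbehind/lookahead probing.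
import Mathlib
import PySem

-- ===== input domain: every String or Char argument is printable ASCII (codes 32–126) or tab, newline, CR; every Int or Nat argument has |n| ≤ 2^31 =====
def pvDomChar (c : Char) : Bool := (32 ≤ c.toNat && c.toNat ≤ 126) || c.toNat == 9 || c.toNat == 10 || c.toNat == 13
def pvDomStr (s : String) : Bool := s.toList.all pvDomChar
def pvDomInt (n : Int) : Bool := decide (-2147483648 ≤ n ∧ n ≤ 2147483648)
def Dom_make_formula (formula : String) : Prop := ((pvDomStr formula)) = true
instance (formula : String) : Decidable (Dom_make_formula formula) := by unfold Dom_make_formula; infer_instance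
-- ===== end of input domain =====

-- B reworks A's indexed scan into an upfront digit count plus a token-consuming loop with a protect-after-G flag (objective: alternative).

-- ===== PORT A =====
-- character.translate(sub): the ten ASCII digits map to subscripts, every other char is unchanged
def pvSubChar (c : Char) : Char :=
  if c = '0' then '₀' else if c = '1' then '₁' else if c = '2' then '₂'
  else if c = '3' then '₃' else if c = '4' then '₄' else if c = '5' then '₅'
  else if c = '6' then '₆' else if c = '7' then '₇' else if c = '8' then '₈'
  else if c = '9' then '₉' else c

-- the 'for index, character in enumerate(formula)' loop with its out/numeric/alphabet state
def pvALoop (cs : List Char) (n : Nat) :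
    List Char → Nat → List Char × Nat × Nat → List Char × Nat × Nat
  | [], _, st => st
  | c :: rest, index, (out, numeric, alphabet) =>
    if 1 ≤ index ∧ PySem.Chars.isdigit c = true ∧ cs.getD (index - 1) ' ' = 'G' then
      pvALoop cs n rest (index + 1) (out ++ [c], numeric + 1, alphabet)
    else if (c = 't' ∨ c = 'i') ∧ index + 2 < n ∧
        ((c = 't' ∧ cs.getD (index + 1) ' ' = 'B' ∧ cs.getD (index + 2) ' ' = 'u') ∨
         (c = 'i' ∧ cs.getD (index + 1) ' ' = 'P' ∧ cs.getD (index + 2) ' ' = 'r')) then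
      pvALoop cs n rest (index + 1) (out ++ [if c = 't' then 'ᵗ' else 'ᶦ'], numeric, alphabet + 1)
    else
      pvALoop cs n rest (index + 1)
        (out ++ [pvSubChar c],
         if PySem.Chars.isdigit c then numeric + 1 else numeric,
         if PySem.Chars.isdigit c then alphabet else alphabet + 1)

def make_formula (formula : String) : String :=
  let cs := formula.toList
  let n := cs.length
  let st := pvALoop cs n cs 0 ([], 0, 0)
  if st.2.1 > st.2.2 then formula else String.ofList st.1

-- ===== PORT B =====
-- the while-loop: protect flag, tBu/iPr consumed as three-char tokens, digits subscripted otherwise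
def pvBLoop : Bool → List Char → List Char
  | _, [] => []
  | protect, c :: rest =>
    if protect = true ∧ PySem.Chars.isdigit c = true then
      c :: pvBLoop (decide (c = 'G')) rest
    else if c = 't' ∧ rest.take 2 = ['B', 'u'] then
      'ᵗ' :: 'B' :: 'u' :: pvBLoop (decide ('u' = 'G')) (rest.drop 2)
    else if c = 'i' ∧ rest.take 2 = ['P', 'r'] then
      'ᶦ' :: 'P' :: 'r' :: pvBLoop (decide ('r' = 'G')) (rest.drop 2)
    else
      pvSubChar c :: pvBLoop (decide (c = 'G')) rest
termination_by _ l => l.length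
decreasing_by all_goals (simp [List.length_drop]; try omega)

def make_formula_alt (formula : String) : String :=
  let cs := formula.toList
  let digits := (cs.filter PySem.Chars.isdigit).length
  if 2 * digits > cs.length then formula
  else String.ofList (pvBLoop false cs)

-- ===== PRECONDITION & SPEC =====
def Spec_make_formula (formula : String) (out : String) : Prop := out = make_formula_alt formula
instance (formula : String) (out : String) : Decidable (Spec_make_formula formula out) := by unfold Spec_make_formula; infer_instance

-- ===== CLAIM (what is proved, stated in full; the proofs are below) =====
def Claim_equal_make_formula : Prop := ∀ (formula : String), Dom_make_formula formula → Spec_make_formula formula (make_formula formula)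

-- ===== LEMMAS AND PROOFS =====


-- B's protect flag at position k, expressed via the original string
def pvPrevG (cs : List Char) : Nat → Bool
  | 0 => false
  | Nat.succ j => decide (cs.getD j ' ' = 'G')

def pvDck (l : List Char) : Nat := (l.filter PySem.Chars.isdigit).length

theorem pvDck_cons (c : Char) (l : List Char) :
    pvDck (c :: l) = (if PySem.Chars.isdigit c then 1 else 0) + pvDck l := by
  simp [pvDck, List.filter_cons]; split <;> simp [Nat.add_comm]

-- one-step unfoldings of the two loops, with the branch condition as a hypothesis
theorem pvA1 (cs : List Char) (n : Nat) (c : Char) (rest : List Char) (k : Nat)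
    (out : List Char) (nu al : Nat)
    (h : 1 ≤ k ∧ PySem.Chars.isdigit c = true ∧ cs.getD (k - 1) ' ' = 'G') :
    pvALoop cs n (c :: rest) k (out, nu, al) =
      pvALoop cs n rest (k + 1) (out ++ [c], nu + 1, al) := by
  rw [pvALoop, if_pos h]

theorem pvA2 (cs : List Char) (n : Nat) (c : Char) (rest : List Char) (k : Nat)
    (out : List Char) (nu al : Nat)
    (h1 : ¬ (1 ≤ k ∧ PySem.Chars.isdigit c = true ∧ cs.getD (k - 1) ' ' = 'G'))
    (h2 : (c = 't' ∨ c = 'i') ∧ k + 2 < n ∧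
      ((c = 't' ∧ cs.getD (k + 1) ' ' = 'B' ∧ cs.getD (k + 2) ' ' = 'u') ∨
       (c = 'i' ∧ cs.getD (k + 1) ' ' = 'P' ∧ cs.getD (k + 2) ' ' = 'r'))) :
    pvALoop cs n (c :: rest) k (out, nu, al) =
      pvALoop cs n rest (k + 1) (out ++ [if c = 't' then 'ᵗ' else 'ᶦ'], nu, al + 1) := by
  rw [pvALoop, if_neg h1, if_pos h2]

theorem pvA3 (cs : List Char) (n : Nat) (c : Char) (rest : List Char) (k : Nat)
    (out : List Char) (nu al : Nat)
    (h1 : ¬ (1 ≤ k ∧ PySem.Chars.isdigit c = true ∧ cs.getD (k - 1) ' ' = 'G'))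
    (h2 : ¬ ((c = 't' ∨ c = 'i') ∧ k + 2 < n ∧
      ((c = 't' ∧ cs.getD (k + 1) ' ' = 'B' ∧ cs.getD (k + 2) ' ' = 'u') ∨
       (c = 'i' ∧ cs.getD (k + 1) ' ' = 'P' ∧ cs.getD (k + 2) ' ' = 'r')))) :
    pvALoop cs n (c :: rest) k (out, nu, al) =
      pvALoop cs n rest (k + 1) (out ++ [pvSubChar c],
        if PySem.Chars.isdigit c then nu + 1 else nu,
        if PySem.Chars.isdigit c then al else al + 1) := by
  rw [pvALoop, if_neg h1, if_neg h2]

theorem pvB1 (protect : Bool) (c : Char) (rest : List Char)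
    (h : protect = true ∧ PySem.Chars.isdigit c = true) :
    pvBLoop protect (c :: rest) = c :: pvBLoop (decide (c = 'G')) rest := by
  rw [pvBLoop, if_pos h]

theorem pvBt (protect : Bool) (c : Char) (rest : List Char)
    (h1 : ¬ (protect = true ∧ PySem.Chars.isdigit c = true))
    (h : c = 't' ∧ rest.take 2 = ['B', 'u']) :
    pvBLoop protect (c :: rest) = 'ᵗ' :: 'B' :: 'u' :: pvBLoop false (rest.drop 2) := by
  rw [pvBLoop, if_neg h1, if_pos h, show (decide ('u' = 'G')) = false from by decide]

theorem pvBi (protect : Bool) (c : Char) (rest : List Char)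
    (h1 : ¬ (protect = true ∧ PySem.Chars.isdigit c = true))
    (h2 : ¬ (c = 't' ∧ rest.take 2 = ['B', 'u']))
    (h : c = 'i' ∧ rest.take 2 = ['P', 'r']) :
    pvBLoop protect (c :: rest) = 'ᶦ' :: 'P' :: 'r' :: pvBLoop false (rest.drop 2) := by
  rw [pvBLoop, if_neg h1, if_neg h2, if_pos h, show (decide ('r' = 'G')) = false from by decide]

theorem pvB3 (protect : Bool) (c : Char) (rest : List Char)
    (h1 : ¬ (protect = true ∧ PySem.Chars.isdigit c = true))
    (h2 : ¬ (c = 't' ∧ rest.take 2 = ['B', 'u']))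
    (h3 : ¬ (c = 'i' ∧ rest.take 2 = ['P', 'r'])) :
    pvBLoop protect (c :: rest) = pvSubChar c :: pvBLoop (decide (c = 'G')) rest := by
  rw [pvBLoop, if_neg h1, if_neg h2, if_neg h3]

theorem pvMain (cs : List Char) :
    ∀ (m : Nat) (rest : List Char) (k : Nat) (out : List Char) (nu al : Nat),
      rest.length ≤ m → cs.drop k = rest →
      pvALoop cs cs.length rest k (out, nu, al) =
        (out ++ pvBLoop (pvPrevG cs k) rest, nu + pvDck rest,
         al + (rest.length - pvDck rest)) := by
  intro m
  induction m with
  | zero =>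
    intro rest k out nu al hm hdrop
    have : rest = [] := List.eq_nil_of_length_eq_zero (Nat.le_zero.mp hm)
    subst this
    simp [pvALoop, pvBLoop, pvDck]
  | succ m ih =>
    intro rest k out nu al hm hdrop
    cases rest with
    | nil => simp [pvALoop, pvBLoop, pvDck]
    | cons c rest' =>
      have hklt : k < cs.length := by
        by_contra h
        have : cs.drop k = [] := List.drop_eq_nil_of_le (Nat.le_of_not_lt h)
        rw [hdrop] at this; exact List.cons_ne_nil _ _ this
      have hck : cs[k] = c := by
        have := List.drop_eq_getElem_cons hklt
        rw [hdrop] at this; exact (List.cons.injEq _ _ _ _ ▸ this).1.symm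
      have hgetk : cs.getD k ' ' = c := by rw [List.getD_eq_getElem cs ' ' hklt, hck]
      have hdrop1 : cs.drop (k + 1) = rest' := by
        rw [← List.tail_drop, hdrop]; rfl
      have hprevk1 : pvPrevG cs (k + 1) = decide (c = 'G') := by
        rw [show pvPrevG cs (k + 1) = decide (cs.getD k ' ' = 'G') from rfl, hgetk]
      have hle : pvDck rest' ≤ rest'.length := List.length_filter_le _ _
      by_cases h1 : 1 ≤ k ∧ PySem.Chars.isdigit c = true ∧ cs.getD (k - 1) ' ' = 'G'
      · -- digit protected by preceding G
        have hprev : pvPrevG cs k = true := by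
          obtain ⟨hk1, _, hG⟩ := h1
          cases k with
          | zero => omega
          | succ j => simpa [pvPrevG] using hG
        rw [pvA1 cs cs.length c rest' k out nu al h1,
          ih rest' (k + 1) (out ++ [c]) (nu + 1) al (by simpa using hm) hdrop1,
          pvB1 (pvPrevG cs k) c rest' ⟨hprev, h1.2.1⟩, ← hprevk1,
          pvDck_cons, if_pos h1.2.1]
        simp only [List.append_assoc, List.singleton_append, List.length_cons,
          Prod.mk.injEq, true_and]
        omega
      · by_cases h2 : (c = 't' ∨ c = 'i') ∧ k + 2 < cs.length ∧
            ((c = 't' ∧ cs.getD (k + 1) ' ' = 'B' ∧ cs.getD (k + 2) ' ' = 'u') ∨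
             (c = 'i' ∧ cs.getD (k + 1) ' ' = 'P' ∧ cs.getD (k + 2) ' ' = 'r'))
        · -- tBu / iPr token: three A-steps correspond to one token step of B
          obtain ⟨hc, hlt, hnext⟩ := h2
          have hk1lt : k + 1 < cs.length := by omega
          have e1 : cs.drop (k + 1) = cs[k + 1] :: cs.drop (k + 2) :=
            List.drop_eq_getElem_cons hk1lt
          have e2 : cs.drop (k + 2) = cs[k + 2] :: cs.drop (k + 3) :=
            List.drop_eq_getElem_cons hlt
          have g1 : cs.getD (k + 1) ' ' = cs[k + 1] := List.getD_eq_getElem cs ' ' hk1lt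
          have g2 : cs.getD (k + 2) ' ' = cs[k + 2] := List.getD_eq_getElem cs ' ' hlt
          have hm3 : (cs.drop (k + 3)).length ≤ m := by
            have h' : rest'.length ≤ m := by simpa using hm
            rw [← hdrop1] at h'; simp at h' ⊢; omega
          have hprevk3 : pvPrevG cs (k + 3) = decide (cs[k + 2] = 'G') := by
            rw [show pvPrevG cs (k + 3) = decide (cs.getD (k + 2) ' ' = 'G') from rfl, g2]
          have hle3 : pvDck (cs.drop (k + 3)) ≤ (cs.drop (k + 3)).length :=
            List.length_filter_le _ _
          rcases hnext with ⟨hc1, hB, hu⟩ | ⟨hc1, hB, hu⟩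
          · -- c = 't', next two = "Bu"
            subst hc1
            have hB' : cs[k + 1] = 'B' := by rw [← g1, hB]
            have hu' : cs[k + 2] = 'u' := by rw [← g2, hu]
            have hrest' : rest' = 'B' :: 'u' :: cs.drop (k + 3) := by
              rw [← hdrop1, e1, hB', e2, hu']
            subst hrest'
            rw [pvA2 cs cs.length 't' _ k out nu al h1
                (by exact ⟨Or.inl rfl, hlt, Or.inl ⟨rfl, hB, hu⟩⟩),
              pvA3 cs cs.length 'B' _ (k + 1) _ _ _
                (fun h => absurd h.2.1 (by decide)) (fun h => absurd h.1 (by decide)),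
              pvA3 cs cs.length 'u' _ (k + 2) _ _ _
                (fun h => absurd h.2.1 (by decide)) (fun h => absurd h.1 (by decide)),
              ih (cs.drop (k + 3)) (k + 3) _ _ _ hm3 rfl, hprevk3, hu',
              pvBt (pvPrevG cs k) 't' ('B' :: 'u' :: cs.drop (k + 3))
                (fun h => absurd h.2 (by decide)) (by exact ⟨rfl, rfl⟩)]
            simp only [pvDck_cons, List.length_cons, List.drop_succ_cons,
              List.drop_zero, List.append_assoc, List.singleton_append,
              List.cons_append, Prod.mk.injEq, if_true, if_false,
              show PySem.Chars.isdigit 'B' = false from by decide,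
              show PySem.Chars.isdigit 'u' = false from by decide,
              show PySem.Chars.isdigit 't' = false from by decide,
              show pvSubChar 'B' = 'B' from rfl,
              show pvSubChar 'u' = 'u' from rfl,
              Bool.false_eq_true, ite_false, if_false, Nat.add_zero, Nat.zero_add,
              List.nil_append, show decide ('u' = 'G') = false from by decide,
              Prod.mk.injEq, true_and]
            omega
          · -- c = 'i', next two = "Pr"
            subst hc1
            have hB' : cs[k + 1] = 'P' := by rw [← g1, hB]
            have hu' : cs[k + 2] = 'r' := by rw [← g2, hu]
            have hrest' : rest' = 'P' :: 'r' :: cs.drop (k + 3) := by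
              rw [← hdrop1, e1, hB', e2, hu']
            subst hrest'
            rw [pvA2 cs cs.length 'i' _ k out nu al h1
                (by exact ⟨Or.inr rfl, hlt, Or.inr ⟨rfl, hB, hu⟩⟩),
              pvA3 cs cs.length 'P' _ (k + 1) _ _ _
                (fun h => absurd h.2.1 (by decide)) (fun h => absurd h.1 (by decide)),
              pvA3 cs cs.length 'r' _ (k + 2) _ _ _
                (fun h => absurd h.2.1 (by decide)) (fun h => absurd h.1 (by decide)),
              ih (cs.drop (k + 3)) (k + 3) _ _ _ hm3 rfl, hprevk3, hu',
              pvBi (pvPrevG cs k) 'i' ('P' :: 'r' :: cs.drop (k + 3))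
                (fun h => absurd h.2 (by decide)) (fun h => absurd h.1 (by decide))
                (by exact ⟨rfl, rfl⟩)]
            simp only [pvDck_cons, List.length_cons, List.drop_succ_cons,
              List.drop_zero, List.append_assoc, List.singleton_append,
              List.cons_append, Prod.mk.injEq, if_true, if_false,
              show PySem.Chars.isdigit 'P' = false from by decide,
              show PySem.Chars.isdigit 'r' = false from by decide,
              show PySem.Chars.isdigit 'i' = false from by decide,
              show pvSubChar 'P' = 'P' from rfl,
              show pvSubChar 'r' = 'r' from rfl,
              Bool.false_eq_true, ite_false, if_false, Nat.add_zero, Nat.zero_add,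
              List.nil_append, show decide ('r' = 'G') = false from by decide,
              show (if 'i' = 't' then 'ᵗ' else 'ᶦ') = 'ᶦ' from by decide,
              Prod.mk.injEq, true_and]
            omega
        · -- plain character
          have hnp : ¬ (pvPrevG cs k = true ∧ PySem.Chars.isdigit c = true) := by
            rintro ⟨hp, hd⟩
            apply h1
            cases k with
            | zero => simp [pvPrevG] at hp
            | succ j =>
              refine ⟨by omega, hd, ?_⟩
              simpa [pvPrevG] using hp
          have htok : ∀ (a b : Char), rest'.take 2 = [a, b] →
              k + 2 < cs.length ∧ cs.getD (k + 1) ' ' = a ∧ cs.getD (k + 2) ' ' = b := by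
            intro a b ht
            have hlen : 2 ≤ rest'.length := by
              have := congrArg List.length ht
              simp at this; omega
            have hl' : k + 2 < cs.length := by
              rw [← hdrop1] at hlen; simp at hlen; omega
            have e1 : cs.drop (k + 1) = cs[k + 1] :: cs.drop (k + 2) :=
              List.drop_eq_getElem_cons (by omega)
            have e2 : cs.drop (k + 2) = cs[k + 2] :: cs.drop (k + 3) :=
              List.drop_eq_getElem_cons hl'
            have htk : rest'.take 2 = cs[k + 1] :: cs[k + 2] :: [] := by
              rw [← hdrop1, e1, e2]; rfl
            rw [ht] at htk
            have ha := (List.cons.injEq _ _ _ _ ▸ htk).1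
            have hb := (List.cons.injEq _ _ _ _ ▸ (List.cons.injEq _ _ _ _ ▸ htk).2).1
            exact ⟨hl', by rw [List.getD_eq_getElem cs ' ' (by omega), ← ha],
              by rw [List.getD_eq_getElem cs ' ' hl', ← hb]⟩
          rw [pvA3 cs cs.length c rest' k out nu al h1 h2,
            ih rest' (k + 1) _ _ _ (by simpa using hm) hdrop1,
            pvB3 (pvPrevG cs k) c rest' hnp
              (fun h => h2 ⟨Or.inl h.1, (htok _ _ h.2).1,
                Or.inl ⟨h.1, (htok _ _ h.2).2.1, (htok _ _ h.2).2.2⟩⟩)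
              (fun h => h2 ⟨Or.inr h.1, (htok _ _ h.2).1,
                Or.inr ⟨h.1, (htok _ _ h.2).2.1, (htok _ _ h.2).2.2⟩⟩),
            ← hprevk1, pvDck_cons]
          rcases Bool.eq_false_or_eq_true (PySem.Chars.isdigit c) with hd | hd <;>
            simp only [hd, if_true, if_false, Bool.false_eq_true, ite_true, ite_false,
              List.length_cons, List.append_assoc, List.singleton_append,
              Prod.mk.injEq, true_and] <;>
            omega

-- ===== VERDICT (by name: the statement is the Claim_ definition above) =====
theorem make_formula_spec : Claim_equal_make_formula := by
  intro formula _
  unfold Spec_make_formula make_formula make_formula_alt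
  have h := pvMain formula.toList formula.toList.length formula.toList 0 [] 0 0 le_rfl rfl
  simp only [] at h ⊢
  rw [h]
  have hle := List.length_filter_le PySem.Chars.isdigit formula.toList
  simp only [pvPrevG, pvDck, List.nil_append, Nat.zero_add]
  by_cases hc : 2 * (formula.toList.filter PySem.Chars.isdigit).length > formula.toList.length
  · rw [if_pos (by omega), if_pos hc]
  · rw [if_neg (by omega), if_neg hc]
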